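-- pv_equiv track=rewrite | github.com/ywjneu/sibyl-research-system | sibyl/orchestrate.py | _strip_leading_title
-- ===== SOURCE A (Python) =====
-- def _strip_leading_title(markdown: str) -> str:
--     lines = markdown.splitlines()
--     while lines and not lines[0].strip():
--         lines.pop(0)
--     if lines and lines[0].lstrip().startswith("#"):
--         lines.pop(0)
--         while lines and not lines[0].strip():
--             lines.pop(0)
--     return "\n".join(lines).strip()
-- ===== SOURCE B (Python) =====
-- def _strip_leading_title(markdown: str) -> str:
--     # Normalize line endings once, then work on the whole text instead of a list of lines.
--     text = "\n".join(markdown.splitlines())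
--     rest = text.lstrip()
--     if rest.startswith("#"):
--         nl = rest.find("\n")
--         rest = "" if nl == -1 else rest[nl + 1:]
--     return rest.strip()
-- ===== Notes on version B (the rewrite author's own statement) =====
-- stated objective: idiomatic
-- what changed: Replaces A's line-list surgery (splitlines, two blank-popping while loops, rejoin) with whole-string operations: one lstrip finds the first non-blank character, and if that character opens a markdown heading the text is cut at the first newline; the final strip subsumes both blank-skipping loops.
import Mathlib
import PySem

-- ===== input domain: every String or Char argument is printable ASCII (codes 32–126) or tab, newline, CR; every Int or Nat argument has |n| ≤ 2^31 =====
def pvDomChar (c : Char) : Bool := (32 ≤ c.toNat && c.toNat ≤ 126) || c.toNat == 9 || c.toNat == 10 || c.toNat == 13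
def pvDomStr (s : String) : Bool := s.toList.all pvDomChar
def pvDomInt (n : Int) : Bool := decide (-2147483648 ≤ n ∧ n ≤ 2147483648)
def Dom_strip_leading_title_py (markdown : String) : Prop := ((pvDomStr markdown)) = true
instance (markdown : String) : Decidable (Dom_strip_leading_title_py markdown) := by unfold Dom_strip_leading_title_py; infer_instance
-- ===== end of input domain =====

-- B replaces A's line-list surgery (two blank-popping loops over splitlines) with whole-string
-- lstrip / cut-at-first-newline / strip; same return value, more idiomatic.

-- ===== PORT A =====
-- 'while lines and not lines[0].strip(): lines.pop(0)'
def pvDropBlank : List (List Char) → List (List Char)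
  | [] => []
  | l :: rest => if PySem.Chars.strip l = [] then pvDropBlank rest else l :: rest

def strip_leading_title_py (markdown : String) : String :=
  let lines0 := pvDropBlank (PySem.Chars.splitlines markdown.toList)
  let lines1 :=
    match lines0 with
    | [] => []
    | l :: rest =>
        if PySem.Chars.startswith (PySem.Chars.lstrip l) ['#'] then pvDropBlank rest
        else l :: rest
  String.mk (PySem.Chars.strip (PySem.Chars.join ['\n'] lines1))

-- ===== PORT B =====
def strip_leading_title_py_alt (markdown : String) : String :=
  let text := PySem.Chars.join ['\n'] (PySem.Chars.splitlines markdown.toList)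
  let rest0 := PySem.Chars.lstrip text
  let rest1 :=
    if PySem.Chars.startswith rest0 ['#'] then
      let nl := PySem.Chars.find rest0 ['\n']
      if nl = -1 then [] else rest0.drop (nl + 1).toNat
    else rest0
  String.mk (PySem.Chars.strip rest1)

-- ===== PRECONDITION & SPEC =====
def Spec_strip_leading_title_py (markdown : String) (out : String) : Prop := out = strip_leading_title_py_alt markdown
instance (markdown : String) (out : String) : Decidable (Spec_strip_leading_title_py markdown out) := by unfold Spec_strip_leading_title_py; infer_instance

-- ===== CLAIM (what is proved, stated in full; the proofs are below) =====
def Claim_equal_strip_leading_title_py : Prop := ∀ (markdown : String), Dom_strip_leading_title_py markdown → Spec_strip_leading_title_py markdown (strip_leading_title_py markdown)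

-- ===== LEMMAS AND PROOFS =====

theorem lstrip_append_ws (p t : List Char) (hp : ∀ c ∈ p, PySem.Chars.isspace c = true) :
    PySem.Chars.lstrip (p ++ t) = PySem.Chars.lstrip t := by
  induction p with
  | nil => rfl
  | cons c p ih =>
      simp only [PySem.Chars.lstrip, List.cons_append, List.dropWhile_cons,
        hp c (List.mem_cons_self ..)]
      exact ih (fun c hc => hp c (List.mem_cons_of_mem _ hc))

theorem lstrip_append_of_ne (p t : List Char) (hp : PySem.Chars.lstrip p ≠ []) :
    PySem.Chars.lstrip (p ++ t) = PySem.Chars.lstrip p ++ t := by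
  induction p with
  | nil => simp [PySem.Chars.lstrip] at hp
  | cons c p ih =>
      simp only [PySem.Chars.lstrip, List.cons_append, List.dropWhile_cons] at *
      by_cases h : PySem.Chars.isspace c = true
      · simp only [h, if_true] at hp ⊢; exact ih hp
      · simp [h]

theorem lstrip_eq_nil_iff (l : List Char) :
    PySem.Chars.lstrip l = [] ↔ ∀ c ∈ l, PySem.Chars.isspace c = true := by
  simp [PySem.Chars.lstrip, List.dropWhile_eq_nil_iff]

theorem lstrip_nil_of_all (l : List Char)
    (h : ∀ c ∈ PySem.Chars.lstrip l, PySem.Chars.isspace c = true) :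
    PySem.Chars.lstrip l = [] := by
  induction l with
  | nil => rfl
  | cons c t ih =>
      simp only [PySem.Chars.lstrip, List.dropWhile_cons] at h ⊢
      by_cases hc : PySem.Chars.isspace c = true
      · simp only [hc, if_true] at h ⊢; exact ih h
      · simp only [hc] at h
        exact absurd (h c (List.mem_cons_self ..)) hc

theorem strip_eq_nil_iff (l : List Char) :
    PySem.Chars.strip l = [] ↔ ∀ c ∈ l, PySem.Chars.isspace c = true := by
  constructor
  · intro h
    have h2 : ∀ c ∈ PySem.Chars.lstrip l, PySem.Chars.isspace c = true := by
      intro c hc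
      simp only [PySem.Chars.strip, PySem.Chars.rstrip, List.reverse_eq_nil_iff,
        List.dropWhile_eq_nil_iff] at h
      exact h c (by simpa using hc)
    exact (lstrip_eq_nil_iff l).1 (lstrip_nil_of_all l h2)
  · intro h
    have hl : PySem.Chars.lstrip l = [] := (lstrip_eq_nil_iff l).2 h
    simp [PySem.Chars.strip, hl, PySem.Chars.rstrip]

theorem lstrip_ne_nil_of_strip (l : List Char) (h : PySem.Chars.strip l ≠ []) :
    PySem.Chars.lstrip l ≠ [] := by
  intro hl
  exact h (by simp [PySem.Chars.strip, hl, PySem.Chars.rstrip])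

theorem lstrip_idem (s : List Char) :
    PySem.Chars.lstrip (PySem.Chars.lstrip s) = PySem.Chars.lstrip s := by
  induction s with
  | nil => rfl
  | cons c t ih =>
      simp only [PySem.Chars.lstrip, List.dropWhile_cons] at ih ⊢
      by_cases hc : PySem.Chars.isspace c = true
      · simpa [hc] using ih
      · simp [hc]

theorem strip_lstrip (s : List Char) :
    PySem.Chars.strip (PySem.Chars.lstrip s) = PySem.Chars.strip s := by
  simp only [PySem.Chars.strip, lstrip_idem]

theorem join_cons_cons (l r : List Char) (R : List (List Char)) :
    PySem.Chars.join ['\n'] (l :: r :: R) = l ++ '\n' :: PySem.Chars.join ['\n'] (r :: R) := by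
  rw [PySem.Chars.join_cons_cons]; simp

-- the leading-blank-popping loop does not change the left-stripped join
theorem lstrip_join_dropBlank (L : List (List Char)) :
    PySem.Chars.lstrip (PySem.Chars.join ['\n'] (pvDropBlank L)) =
      PySem.Chars.lstrip (PySem.Chars.join ['\n'] L) := by
  induction L with
  | nil => rfl
  | cons l R ih =>
      by_cases h : PySem.Chars.strip l = []
      · have hws : ∀ c ∈ l, PySem.Chars.isspace c = true := (strip_eq_nil_iff l).1 h
        rw [pvDropBlank, if_pos h, ih]
        cases R with
        | nil =>
            rw [PySem.Chars.join_singleton, (lstrip_eq_nil_iff l).2 hws, PySem.Chars.join_nil]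
            rfl
        | cons r R' =>
            rw [join_cons_cons, show l ++ '\n' :: PySem.Chars.join ['\n'] (r :: R') =
              (l ++ ['\n']) ++ PySem.Chars.join ['\n'] (r :: R') by simp,
              lstrip_append_ws]
            intro c hc
            rcases List.mem_append.1 hc with h1 | h2
            · exact hws c h1
            · simp at h2; subst h2; decide
      · rw [pvDropBlank, if_neg h]

theorem pvDropBlank_head (L : List (List Char)) (l : List Char) (R : List (List Char))
    (h : pvDropBlank L = l :: R) : PySem.Chars.strip l ≠ [] := by
  induction L with
  | nil => simp [pvDropBlank] at h
  | cons x X ih =>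
      rw [pvDropBlank] at h
      by_cases hx : PySem.Chars.strip x = []
      · rw [if_pos hx] at h; exact ih h
      · rw [if_neg hx] at h; cases h; exact hx

theorem pvDropBlank_mem (L : List (List Char)) (x : List Char)
    (h : x ∈ pvDropBlank L) : x ∈ L := by
  induction L with
  | nil => simp [pvDropBlank] at h
  | cons y Y ih =>
      rw [pvDropBlank] at h
      by_cases hy : PySem.Chars.strip y = []
      · rw [if_pos hy] at h; exact List.mem_cons_of_mem _ (ih h)
      · rw [if_neg hy] at h; exact h

-- lines produced by splitlines never contain a line-break character
theorem splitlines_go_no_break (isB : Char → Bool) (s cur : List Char) (acc : List (List Char)) :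
    (∀ c ∈ cur, isB c = false) → (∀ l ∈ acc, ∀ c ∈ l, isB c = false) →
    ∀ l ∈ PySem.Chars.splitlines.go isB s cur acc, ∀ c ∈ l, isB c = false := by
  induction s, cur, acc using PySem.Chars.splitlines.go.induct isB with
  | case1 cur acc hcur =>
      intro h1 h2 l hl
      rw [PySem.Chars.splitlines.go] at hl
      simp only [hcur, if_true] at hl
      exact h2 l (by simpa using hl)
  | case2 cur acc hcur =>
      intro h1 h2 l hl
      rw [PySem.Chars.splitlines.go, if_neg hcur] at hl
      simp only [List.reverse_cons, List.mem_append, List.mem_reverse, List.mem_singleton] at hl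
      rcases hl with h | h
      · exact h2 l h
      · subst h; intro c hc; exact h1 c (by simpa using hc)
  | case3 rest cur acc ih =>
      intro h1 h2
      rw [PySem.Chars.splitlines.go.eq_def]
      exact ih (by simp) (by
        intro l hl
        rcases List.mem_cons.1 hl with h | h
        · subst h; intro c hc; exact h1 c (by simpa using hc)
        · exact h2 l h)
  | case4 c rest cur acc hguard hB ih =>
      intro h1 h2
      rw [PySem.Chars.splitlines.go.eq_def]
      split
      · next heq => exact absurd heq (by simp)
      · next heq =>
          injection heq with e1 e2
          exact (hguard _ e1 e2).elim
      · next c2 rest2 hg2 heq =>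
          injection heq with e1 e2
          subst e1; subst e2
          rw [hB, if_pos rfl]
          exact ih (by simp) (by
            intro l hl
            rcases List.mem_cons.1 hl with h | h
            · subst h; intro c' hc; exact h1 c' (by simpa using hc)
            · exact h2 l h)
  | case5 c rest cur acc hguard hB ih =>
      intro h1 h2
      rw [PySem.Chars.splitlines.go.eq_def]
      split
      · next heq => exact absurd heq (by simp)
      · next heq =>
          injection heq with e1 e2
          exact (hguard _ e1 e2).elim
      · next c2 rest2 hg2 heq =>
          injection heq with e1 e2
          subst e1; subst e2
          rw [if_neg hB]
          exact ih (by
            intro c' hc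
            rcases List.mem_cons.1 hc with h | h
            · subst h; simpa using hB
            · exact h1 c' h) h2

theorem splitlines_no_newline (cs : List Char) (l : List Char)
    (h : l ∈ PySem.Chars.splitlines cs) : '\n' ∉ l := by
  intro hm
  rw [PySem.Chars.splitlines] at h
  have := splitlines_go_no_break _ cs [] [] (by simp) (by simp) l h '\n' hm
  simp at this

-- find of a single newline
theorem find_go_none (s : List Char) : ∀ (k : Nat), '\n' ∉ s →
    PySem.Chars.find.go ['\n'] s k = -1 := by
  induction s with
  | nil => intro k h; rfl
  | cons c t ih =>
      intro k h
      rw [PySem.Chars.find.go]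
      have hc : c ≠ '\n' := fun hc => h (by simp [hc])
      have hpf : List.isPrefixOf ['\n'] (c :: t) = false := by
        simp [List.isPrefixOf]; exact fun hh => absurd hh.symm hc
      rw [hpf]
      simp only [Bool.false_eq_true, if_false]
      exact ih (k + 1) (fun hm => h (List.mem_cons_of_mem _ hm))

theorem find_go_pos (p t : List Char) : ∀ (k : Nat), '\n' ∉ p →
    PySem.Chars.find.go ['\n'] (p ++ '\n' :: t) k = (k : Int) + p.length := by
  induction p with
  | nil =>
      intro k h
      rw [List.nil_append, PySem.Chars.find.go]
      simp [List.isPrefixOf]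
  | cons c q ih =>
      intro k h
      rw [List.cons_append, PySem.Chars.find.go]
      have hc : c ≠ '\n' := fun hc => h (by simp [hc])
      have hpf : List.isPrefixOf ['\n'] (c :: (q ++ '\n' :: t)) = false := by
        simp [List.isPrefixOf]; exact fun hh => absurd hh.symm hc
      rw [hpf]
      simp only [Bool.false_eq_true, if_false]
      rw [ih (k + 1) (fun hm => h (List.mem_cons_of_mem _ hm))]
      simp only [List.length_cons]; push_cast; ring

-- the char-level statement, proved for every input string
theorem core_eq (markdown : String) :
    strip_leading_title_py markdown = strip_leading_title_py_alt markdown := by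
  unfold strip_leading_title_py strip_leading_title_py_alt
  set L := PySem.Chars.splitlines markdown.toList with hL
  have hDB := lstrip_join_dropBlank L
  cases hdb : pvDropBlank L with
  | nil =>
      rw [hdb] at hDB
      dsimp only
      have h0 : PySem.Chars.lstrip (PySem.Chars.join ['\n'] L) = [] := by
        rw [← hDB, PySem.Chars.join_nil]; rfl
      rw [h0, show PySem.Chars.startswith [] ['#'] = false from rfl]
      simp only [Bool.false_eq_true, if_false]
      rw [PySem.Chars.join_nil]
  | cons l R =>
      rw [hdb] at hDB
      dsimp only
      have hlne : PySem.Chars.lstrip l ≠ [] :=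
        lstrip_ne_nil_of_strip l (pvDropBlank_head L l R hdb)
      obtain ⟨d, l2, hdl⟩ : ∃ d l2, PySem.Chars.lstrip l = d :: l2 := by
        cases hx : PySem.Chars.lstrip l with
        | nil => exact absurd hx hlne
        | cons d l2 => exact ⟨d, l2, rfl⟩
      have hnol : '\n' ∉ l := splitlines_no_newline _ l
        (pvDropBlank_mem L l (by rw [hdb]; exact List.mem_cons_self ..))
      have hnolstrip : '\n' ∉ PySem.Chars.lstrip l := fun hm =>
        hnol ((List.dropWhile_sublist _).subset hm)
      cases R with
      | nil =>
          have hdec : PySem.Chars.lstrip (PySem.Chars.join ['\n'] L) = d :: l2 := by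
            rw [← hDB, PySem.Chars.join_singleton, hdl]
          rw [hdec, hdl]
          by_cases hhash : d = '#'
          · rw [show PySem.Chars.startswith (d :: l2) ['#'] = true by
              simp [PySem.Chars.startswith, List.isPrefixOf, hhash]]
            simp only [if_true]
            rw [show PySem.Chars.find (d :: l2) ['\n'] = -1 from by
              rw [PySem.Chars.find, find_go_none (d :: l2) 0 (by rw [← hdl]; exact hnolstrip)],
              if_pos rfl]
            rfl
          · rw [show PySem.Chars.startswith (d :: l2) ['#'] = false by
              simp [PySem.Chars.startswith, List.isPrefixOf]
              exact fun hh => absurd hh.symm hhash]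
            simp only [Bool.false_eq_true, if_false]
            rw [show (d :: l2) = PySem.Chars.lstrip (PySem.Chars.join ['\n'] L) from hdec.symm,
              strip_lstrip,
              show PySem.Chars.strip (PySem.Chars.join ['\n'] L) =
                PySem.Chars.strip (PySem.Chars.join ['\n'] [l]) from by
                rw [← strip_lstrip (PySem.Chars.join ['\n'] L), ← hDB, strip_lstrip]]
      | cons r R' =>
          have hdec : PySem.Chars.lstrip (PySem.Chars.join ['\n'] L) =
              (d :: l2) ++ '\n' :: PySem.Chars.join ['\n'] (r :: R') := by
            rw [← hDB, join_cons_cons, lstrip_append_of_ne l _ hlne, hdl]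
          rw [hdec, hdl]
          by_cases hhash : d = '#'
          · rw [show PySem.Chars.startswith (d :: l2) ['#'] = true by
                simp [PySem.Chars.startswith, List.isPrefixOf, hhash],
              show PySem.Chars.startswith ((d :: l2) ++ '\n' :: PySem.Chars.join ['\n'] (r :: R')) ['#'] = true by
                simp [PySem.Chars.startswith, List.isPrefixOf, hhash]]
            simp only [if_true]
            rw [show PySem.Chars.find ((d :: l2) ++ '\n' :: PySem.Chars.join ['\n'] (r :: R')) ['\n'] =
                ((d :: l2).length : Int) from by
              rw [PySem.Chars.find, find_go_pos (d :: l2) _ 0 (by rw [← hdl]; exact hnolstrip)]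
              push_cast; ring,
              if_neg (by omega)]
            rw [show ((((d :: l2).length : Int)) + 1).toNat = ((d :: l2) ++ ['\n']).length from by
                simp; omega,
              show ((d :: l2) ++ '\n' :: PySem.Chars.join ['\n'] (r :: R')) =
                ((d :: l2) ++ ['\n']) ++ PySem.Chars.join ['\n'] (r :: R') from by simp,
              List.drop_left]
            rw [show PySem.Chars.strip (PySem.Chars.join ['\n'] (pvDropBlank (r :: R'))) =
              PySem.Chars.rstrip (PySem.Chars.lstrip (PySem.Chars.join ['\n'] (pvDropBlank (r :: R')))) from rfl,
              lstrip_join_dropBlank (r :: R')]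
            rfl
          · rw [show PySem.Chars.startswith (d :: l2) ['#'] = false by
                simp [PySem.Chars.startswith, List.isPrefixOf]
                exact fun hh => absurd hh.symm hhash,
              show PySem.Chars.startswith ((d :: l2) ++ '\n' :: PySem.Chars.join ['\n'] (r :: R')) ['#'] = false by
                simp [PySem.Chars.startswith, List.isPrefixOf]
                exact fun hh => absurd hh.symm hhash]
            simp only [Bool.false_eq_true, if_false]
            rw [show ((d :: l2) ++ '\n' :: PySem.Chars.join ['\n'] (r :: R')) =
              PySem.Chars.lstrip (PySem.Chars.join ['\n'] L) from hdec.symm,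
              strip_lstrip,
              show PySem.Chars.strip (PySem.Chars.join ['\n'] L) =
                PySem.Chars.strip (PySem.Chars.join ['\n'] (l :: r :: R')) from by
                rw [← strip_lstrip (PySem.Chars.join ['\n'] L), ← hDB, strip_lstrip]]

-- ===== VERDICT (by name: the statement is the Claim_ definition above) =====
theorem strip_leading_title_py_spec : Claim_equal_strip_leading_title_py := by
  intro markdown _
  unfold Spec_strip_leading_title_py
  exact core_eq markdown
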